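-- pv_equiv track=rewrite | github.com/nasa/AI4LS | FLUID/crisp/utils/plotting_CDFs.py | CDF_related_links
-- ===== SOURCE A (Python) =====
-- def CDF_related_links(results, causalnex=False):
--     CDF = [0]
--     for j in range(len(results)):
--         if 'Causal' in results[j][0] or 'Non' in results[j][0]:
--             CDF.append(CDF[-1]+1)
--         else:
--             CDF.append(CDF[-1])
--     return CDF
-- ===== SOURCE B (Python) =====
-- def CDF_related_links(results, causalnex=False):
--     # For each prefix length j, count the related rows in that prefix directly.
--     def related(r):
--         return 'Causal' in r[0] or 'Non' in r[0]
--     return [sum(1 for r in results[:j] if related(r)) for j in range(len(results) + 1)]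
-- ===== Notes on version B (the rewrite author's own statement) =====
-- stated objective: alternative
-- what changed: Replaces A's stateful running accumulator (appending CDF[-1] or CDF[-1]+1) with a stateless per-prefix formulation: CDF[j] is computed independently as the count of related rows in the prefix results[:j], over j = 0..len(results).
import Mathlib
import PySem

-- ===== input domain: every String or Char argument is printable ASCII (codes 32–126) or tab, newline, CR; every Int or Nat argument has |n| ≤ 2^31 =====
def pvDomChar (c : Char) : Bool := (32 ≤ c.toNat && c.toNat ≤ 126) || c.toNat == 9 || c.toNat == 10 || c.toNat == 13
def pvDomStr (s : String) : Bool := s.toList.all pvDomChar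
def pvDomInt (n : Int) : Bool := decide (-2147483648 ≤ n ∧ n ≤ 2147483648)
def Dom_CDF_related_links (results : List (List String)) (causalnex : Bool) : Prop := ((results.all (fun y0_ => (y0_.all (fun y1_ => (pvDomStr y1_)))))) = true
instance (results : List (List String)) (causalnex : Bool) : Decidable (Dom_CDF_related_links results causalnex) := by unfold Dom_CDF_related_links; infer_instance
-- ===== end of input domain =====

-- B replaces A's running accumulator by a stateless per-prefix formulation (CDF[j]
-- = count of related rows in results[:j]): an alternative decomposition, same values
-- on rows with a nonempty first cell.


-- ===== PORT A =====
-- for j in range(len(results)): read results[j][0], append CDF[-1]+1 or CDF[-1].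
def CDF_related_links (results : List (List String)) (causalnex : Bool) : List Int :=
  (PySem.List.pyRange 0 (results.length) 1).foldl
    (fun CDF j =>
      let s := PySem.List.pyGetD (PySem.List.pyGetD results j []) 0 ""
      if PySem.Str.isIn "Causal" s || PySem.Str.isIn "Non" s then
        CDF ++ [PySem.List.pyGetD CDF (-1) 0 + 1]
      else
        CDF ++ [PySem.List.pyGetD CDF (-1) 0])
    [0]

-- ===== PORT B =====
-- helper 'related(r)' of Source B
def pvRelated (r : List String) : Bool :=
  PySem.Str.isIn "Causal" (PySem.List.pyGetD r 0 "") || PySem.Str.isIn "Non" (PySem.List.pyGetD r 0 "")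

-- [sum(1 for r in results[:j] if related(r)) for j in range(len(results)+1)]
def CDF_related_links_alt (results : List (List String)) (causalnex : Bool) : List Int :=
  (PySem.List.pyRange 0 ((results.length : Int) + 1) 1).map
    (fun j => (PySem.List.slice results none (some j)).foldl
        (fun s r => if pvRelated r then s + 1 else s) 0)

-- ===== PRECONDITION & SPEC =====
-- Pre_ excludes rows that are empty lists: there results[j][0] raises IndexError in A (and in B).
def Pre_CDF_related_links (results : List (List String)) (causalnex : Bool) : Prop :=
  ∀ r ∈ results, r ≠ []
instance (results : List (List String)) (causalnex : Bool) : Decidable (Pre_CDF_related_links results causalnex) := by unfold Pre_CDF_related_links; infer_instance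
def pvWitness_CDF_related_links : List (List String) × Bool := ([["Causal edge"], ["none"], ["Nonlinear"]], false)

def Spec_CDF_related_links (results : List (List String)) (causalnex : Bool) (out : List Int) : Prop := out = CDF_related_links_alt results causalnex
instance (results : List (List String)) (causalnex : Bool) (out : List Int) : Decidable (Spec_CDF_related_links results causalnex out) := by unfold Spec_CDF_related_links; infer_instance

-- ===== CLAIM (what is proved, stated in full; the proofs are below) =====
def Claim_equal_CDF_related_links : Prop := ∀ (results : List (List String)) (causalnex : Bool), Dom_CDF_related_links results causalnex → Pre_CDF_related_links results causalnex → Spec_CDF_related_links results causalnex (CDF_related_links results causalnex)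

-- ===== LEMMAS AND PROOFS =====

-- the per-row 0/1 indicator A's branch adds
def pvFlag (r : List String) : Int := if pvRelated r then 1 else 0

-- CDF[-1] of a nonempty accumulator is its last element
theorem pvGetD_neg_one_append (acc : List Int) (x : Int) :
    PySem.List.pyGetD (acc ++ [x]) (-1) 0 = x := by
  simp [PySem.List.pyGetD_neg_ofNat (acc ++ [x]) 1 0 (by omega) (by simp)]

-- A's loop invariant: the fold extends the accumulator by the running prefix sums of the flags
theorem pvLoop (rs : List (List String)) (acc : List Int) (x : Int) :
    rs.foldl (fun CDF r =>
        if pvRelated r then CDF ++ [PySem.List.pyGetD CDF (-1) 0 + 1]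
        else CDF ++ [PySem.List.pyGetD CDF (-1) 0]) (acc ++ [x])
      = acc ++ List.scanl (fun total f => total + f) x (rs.map pvFlag) := by
  induction rs generalizing acc x with
  | nil => simp
  | cons r rs ih =>
    simp only [List.foldl_cons, List.map_cons]
    rw [List.scanl_cons]
    by_cases h : pvRelated r = true
    · rw [if_pos h, pvGetD_neg_one_append]
      have := ih (acc ++ [x]) (x + 1)
      simp only [List.append_assoc, List.cons_append, List.nil_append] at this ⊢
      rw [this, pvFlag, if_pos h]
    · rw [if_neg h, pvGetD_neg_one_append]
      have := ih (acc ++ [x]) x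
      simp only [List.append_assoc, List.cons_append, List.nil_append] at this ⊢
      rw [this, pvFlag, if_neg h]
      norm_num

-- B's inner counting fold, in closed form
theorem pvCountFold (l : List (List String)) (x : Int) :
    l.foldl (fun s r => if pvRelated r then s + 1 else s) x
      = x + (l.countP pvRelated : Int) := by
  induction l generalizing x with
  | nil => simp
  | cons r l ih =>
    by_cases h : pvRelated r = true <;>
      simp [h, ih] <;> push_cast <;> ring

-- the running prefix sums ARE the per-prefix counts
theorem pvScanlEqCounts (l : List (List String)) (x : Int) :
    List.scanl (fun total f => total + f) x (l.map pvFlag)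
      = (List.range (l.length + 1)).map (fun k => x + ((l.take k).countP pvRelated : Int)) := by
  induction l generalizing x with
  | nil => simp
  | cons r l ih =>
    simp only [List.map_cons, List.scanl_cons, List.length_cons]
    rw [List.range_succ_eq_map, List.map_cons, List.map_map, ih (x + pvFlag r)]
    congr 1
    · simp
    · apply List.map_congr_left
      intro k _
      simp only [Function.comp_apply, List.take_succ_cons, List.countP_cons, pvFlag]
      by_cases h : pvRelated r = true <;> simp [h] <;> push_cast <;> ring

-- ===== VERDICT (by name: the statement is the Claim_ definition above) =====
theorem CDF_related_links_spec : Claim_equal_CDF_related_links := by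
  intro results causalnex _ _
  unfold Spec_CDF_related_links CDF_related_links CDF_related_links_alt
  rw [PySem.List.foldl_pyRange_zero_pyGetD' results []
    (fun CDF r =>
      if PySem.Str.isIn "Causal" (PySem.List.pyGetD r 0 "") ||
          PySem.Str.isIn "Non" (PySem.List.pyGetD r 0 "") then
        CDF ++ [PySem.List.pyGetD CDF (-1) 0 + 1]
      else CDF ++ [PySem.List.pyGetD CDF (-1) 0]) [0]]
  have hA := pvLoop results [] 0
  simp only [List.nil_append] at hA
  refine hA.trans ?_   -- the fold functions are definitionally equal (pvRelated unfolds)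
  rw [pvScanlEqCounts, PySem.List.pyRange_one]
  simp only [List.map_map]
  apply List.map_congr_left
  intro k hk
  simp only [Function.comp_apply, zero_add]
  rw [PySem.List.slice_to_natCast, pvCountFold]
  simp
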